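-- pv_equiv track=rewrite | github.com/Chaitanyabsprip/gcj-kata | saving_the_universe/python/save_the_universe/save_the_universe.py | count_switches
-- ===== SOURCE A (Python) =====
-- def should_switch(current_engine: str, query: str) -> bool:
--     return current_engine == query
--
-- def count_switches(engines: list[str],
--                    queries: list[str],
--                    switch_count: int = 0) -> int:
--     if len(engines) == 0 or len(queries) == 0:
--         return switch_count
--     if should_switch(engines[0], queries[0]):
--         switch_count += 1
--         engines = engines[1:]
--     return count_switches(engines, queries[1:], switch_count)
-- ===== SOURCE B (Python) =====
-- def count_switches(engines: list[str],
--                    queries: list[str],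
--                    switch_count: int = 0) -> int:
--     i = 0
--     for q in queries:
--         if i < len(engines) and engines[i] == q:
--             i += 1
--             switch_count += 1
--     return switch_count
-- ===== Notes on version B (the rewrite author's own statement) =====
-- stated objective: faster
-- what changed: replaces the O(n^2) list-slicing recursion by a single iterative pass over the queries with an index pointer into engines
import Mathlib
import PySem

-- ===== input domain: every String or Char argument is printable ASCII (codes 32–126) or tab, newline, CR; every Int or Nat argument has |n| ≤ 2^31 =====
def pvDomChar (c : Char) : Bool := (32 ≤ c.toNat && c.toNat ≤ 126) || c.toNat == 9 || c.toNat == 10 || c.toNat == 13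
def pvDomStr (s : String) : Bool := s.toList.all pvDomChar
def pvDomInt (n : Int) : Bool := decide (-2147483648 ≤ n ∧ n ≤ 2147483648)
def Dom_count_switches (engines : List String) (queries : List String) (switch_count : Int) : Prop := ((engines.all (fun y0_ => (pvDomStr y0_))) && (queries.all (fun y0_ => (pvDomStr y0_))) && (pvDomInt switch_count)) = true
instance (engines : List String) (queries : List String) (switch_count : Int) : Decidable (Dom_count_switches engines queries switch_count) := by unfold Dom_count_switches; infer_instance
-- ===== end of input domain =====

-- B replaces A's list-slicing recursion with a single iterative pass keeping an index pointer into engines (faster).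
-- ===== PORT A =====
def should_switch (current_engine : String) (query : String) : Bool :=
  current_engine == query

def count_switches (engines : List String) (queries : List String) (switch_count : Int) : Int :=
  match engines, queries with
  | [], _ => switch_count
  | _, [] => switch_count
  | e :: es, q :: qs =>
    if should_switch e q then count_switches es qs (switch_count + 1)
    else count_switches (e :: es) qs switch_count

-- ===== PORT B =====
def count_switches_alt (engines : List String) (queries : List String) (switch_count : Int) : Int :=
  (queries.foldl (fun (st : Nat × Int) q =>
      match engines[st.1]? with
      | some e => if e == q then (st.1 + 1, st.2 + 1) else st
      | none => st)
    (0, switch_count)).2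

-- ===== PRECONDITION & SPEC =====
def Spec_count_switches (engines : List String) (queries : List String) (switch_count : Int) (out : Int) : Prop := out = count_switches_alt engines queries switch_count
instance (engines : List String) (queries : List String) (switch_count : Int) (out : Int) : Decidable (Spec_count_switches engines queries switch_count out) := by unfold Spec_count_switches; infer_instance

-- ===== CLAIM (what is proved, stated in full; the proofs are below) =====
def Claim_equal_count_switches : Prop := ∀ (engines : List String) (queries : List String) (switch_count : Int), Dom_count_switches engines queries switch_count → Spec_count_switches engines queries switch_count (count_switches engines queries switch_count)

-- ===== LEMMAS AND PROOFS =====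

-- ===== VERDICT (by name: the statement is the Claim_ definition above) =====
-- loop invariant: the fold over queries starting at index i computes A's recursion on engines.drop i
theorem fold_eq_drop (queries : List String) (engines : List String) (i : Nat) (sc : Int) :
    (queries.foldl (fun (st : Nat × Int) q =>
        match engines[st.1]? with
        | some e => if e == q then (st.1 + 1, st.2 + 1) else st
        | none => st)
      (i, sc)).2 = count_switches (engines.drop i) queries sc := by
  induction queries generalizing i sc with
  | nil => cases engines.drop i <;> simp [count_switches]
  | cons q qs ih =>
    simp only [List.foldl_cons]
    cases h : engines[i]? with
    | none =>
      have hle : engines.length ≤ i := List.getElem?_eq_none_iff.mp h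
      rw [ih i sc, List.drop_eq_nil_of_le hle]
      simp [count_switches]
    | some e =>
      obtain ⟨hlt, heq⟩ := List.getElem?_eq_some_iff.mp h
      have hdrop : engines.drop i = e :: engines.drop (i + 1) := by
        rw [List.drop_eq_getElem_cons hlt, heq]
      simp only [h]
      rw [hdrop]
      by_cases he : e == q
      · rw [if_pos he, ih (i + 1) (sc + 1)]
        simp [count_switches, should_switch, he]
      · rw [if_neg he, ih i sc, hdrop]
        simp [count_switches, should_switch, he]

theorem count_switches_spec : Claim_equal_count_switches := by
  intro engines queries switch_count _
  unfold Spec_count_switches count_switches_alt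
  simpa using (fold_eq_drop queries engines 0 switch_count).symm
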